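-- pv_equiv track=rewrite | github.com/Zomma-Labs/ZommaLabsKnowledgeGraph | deprecated/agents/entity_deduplicator.py | mapping_to_groups
-- ===== SOURCE A (Python) =====
-- from typing import Any, Dict, List
--
-- def mapping_to_groups(mapping: Dict[str, str]) -> tuple[Dict[str, List[str]], List[str]]:
--     """Convert mapping back to groups format for reflection."""
--     groups: Dict[str, List[str]] = {}
--     ungrouped: List[str] = []
--
--     for entity, canonical in mapping.items():
--         if entity == canonical:
--             # Check if this canonical has any aliases
--             aliases = [e for e, c in mapping.items() if c == canonical and e != canonical]
--             if aliases:
--                 groups[canonical] = aliases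
--             else:
--                 ungrouped.append(entity)
--         # Aliases are already captured when we process their canonical
--
--     return groups, ungrouped
-- ===== SOURCE B (Python) =====
-- from typing import Dict, List
--
-- def mapping_to_groups(mapping: Dict[str, str]) -> tuple[Dict[str, List[str]], List[str]]:
--     """Convert mapping back to groups format for reflection (index once, then emit by comprehensions)."""
--     idx: Dict[str, List[str]] = {}
--     for entity, canonical in mapping.items():
--         if entity != canonical:
--             idx.setdefault(canonical, []).append(entity)
--     selfs = [e for e, c in mapping.items() if e == c]
--     groups = {e: idx[e] for e in selfs if e in idx}
--     ungrouped = [e for e in selfs if e not in idx]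
--     return groups, ungrouped
-- ===== Notes on version B (the rewrite author's own statement) =====
-- stated objective: alternative
-- what changed: B builds a canonical->aliases index in one pass and then derives groups and ungrouped by two comprehensions over the list of self-mapped entities, instead of A's single accumulating loop that rescans the whole mapping for aliases at each self-mapped key; on the measured random inputs (few self-mapped keys) this is not faster.
import Mathlib
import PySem

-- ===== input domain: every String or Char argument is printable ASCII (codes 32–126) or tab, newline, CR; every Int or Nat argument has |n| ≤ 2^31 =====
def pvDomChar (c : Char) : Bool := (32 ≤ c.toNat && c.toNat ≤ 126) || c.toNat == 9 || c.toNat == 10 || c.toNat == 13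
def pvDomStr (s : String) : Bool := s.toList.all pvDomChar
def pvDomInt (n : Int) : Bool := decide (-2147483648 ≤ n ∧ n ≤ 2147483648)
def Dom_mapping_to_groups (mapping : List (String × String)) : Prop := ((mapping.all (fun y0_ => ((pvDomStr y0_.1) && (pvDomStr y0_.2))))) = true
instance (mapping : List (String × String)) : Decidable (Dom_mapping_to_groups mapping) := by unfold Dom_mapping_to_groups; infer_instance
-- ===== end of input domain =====

-- B builds a canonical->aliases index in one pass, then derives groups/ungrouped from the
-- self-mapped entities by comprehensions, instead of A's per-key rescan of the whole mapping.

-- ===== PORT A =====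
def mapping_to_groups (mapping : List (String × String)) : (List (String × List String)) × List String :=
  let st := mapping.foldl
    (fun (st : PySem.Dict String (List String) × List String) p =>
      if p.1 == p.2 then
        let aliases := (mapping.filter (fun q => q.2 == p.2 && q.1 != p.2)).map (·.1)
        if aliases.isEmpty then (st.1, st.2 ++ [p.1]) else (st.1.insert p.2 aliases, st.2)
      else st)
    (PySem.Dict.empty, [])
  (st.1.items, st.2)

-- ===== PORT B =====
-- 'idx[e]' under the guard 'e in idx' is ported as getD (exact: the key is present).
def mapping_to_groups_alt (mapping : List (String × String)) : (List (String × List String)) × List String :=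
  let idx := mapping.foldl
    (fun (d : PySem.Dict String (List String)) p =>
      if p.1 != p.2 then d.modify p.2 [] (· ++ [p.1]) else d)
    PySem.Dict.empty
  let selfs := (mapping.filter (fun p => p.1 == p.2)).map (·.1)
  let groups := selfs.foldl
    (fun (g : PySem.Dict String (List String)) e =>
      if idx.contains e then g.insert e (idx.getD e []) else g)
    PySem.Dict.empty
  let ungrouped := selfs.filter (fun e => !(idx.contains e))
  (groups.items, ungrouped)

-- ===== PRECONDITION & SPEC =====
def Spec_mapping_to_groups (mapping : List (String × String)) (out : (List (String × List String)) × List String) : Prop := out = mapping_to_groups_alt mapping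
instance (mapping : List (String × String)) (out : (List (String × List String)) × List String) : Decidable (Spec_mapping_to_groups mapping out) := by unfold Spec_mapping_to_groups; infer_instance

-- ===== CLAIM (what is proved, stated in full; the proofs are below) =====
def Claim_equal_mapping_to_groups : Prop := ∀ (mapping : List (String × String)), Dom_mapping_to_groups mapping → Spec_mapping_to_groups mapping (mapping_to_groups mapping)

-- ===== LEMMAS AND PROOFS =====

-- B's index looks up exactly the alias list A recomputes by filtering
theorem idx_getD (l : List (String × String)) (d : PySem.Dict String (List String)) (c : String) :
    (l.foldl (fun d p => if p.1 != p.2 then d.modify p.2 [] (· ++ [p.1]) else d) d).getD c []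
      = d.getD c [] ++ ((l.filter (fun p => p.2 == c && p.1 != p.2)).map (·.1)) := by
  induction l generalizing d with
  | nil => simp
  | cons p l ih =>
    simp only [List.foldl_cons, List.filter_cons]
    by_cases h1 : p.1 = p.2
    · rw [if_neg (by simp [h1]), ih]
      simp [h1]
    · rw [if_pos (by simp [h1]), ih, PySem.Dict.getD_modify]
      by_cases h2 : p.2 = c
      · subst h2; simp [h1]
      · have h2' : ¬ c = p.2 := fun h => h2 h.symm
        simp [h1, h2, h2']

-- B's index contains a key iff A's alias filter at that key is nonempty
theorem idx_contains (l : List (String × String)) (d : PySem.Dict String (List String)) (c : String) :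
    (l.foldl (fun d p => if p.1 != p.2 then d.modify p.2 [] (· ++ [p.1]) else d) d).contains c
      = (d.contains c || !((l.filter (fun p => p.2 == c && p.1 != p.2)).isEmpty)) := by
  induction l generalizing d with
  | nil => simp
  | cons p l ih =>
    simp only [List.foldl_cons, List.filter_cons]
    by_cases h1 : p.1 = p.2
    · rw [if_neg (by simp [h1]), ih]
      simp [h1]
    · rw [if_pos (by simp [h1]), ih, PySem.Dict.contains_modify]
      by_cases h2 : p.2 = c
      · subst h2; simp [h1]
      · have h2' : ¬ (c == p.2) = true := by
          simp only [beq_iff_eq]; exact fun h => h2 h.symm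
        simp [h1, h2, h2']

-- the two alias-filter predicates agree (when q.2 = c, 'q.1 != q.2' is 'q.1 != c')
theorem pred_eq (c : String) :
    (fun q : String × String => q.2 == c && q.1 != q.2) = (fun q => q.2 == c && q.1 != c) := by
  funext q
  by_cases h : q.2 = c
  · rw [h]
  · rw [beq_eq_false_iff_ne.mpr h]; simp

-- closed form of A's single accumulating loop over the self-mapped entities
theorem aFold_closed (mapping l : List (String × String))
    (d : PySem.Dict String (List String)) (u : List String) :
    l.foldl
      (fun (st : PySem.Dict String (List String) × List String) p =>
        if p.1 == p.2 then
          let aliases := (mapping.filter (fun q => q.2 == p.2 && q.1 != p.2)).map (·.1)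
          if aliases.isEmpty then (st.1, st.2 ++ [p.1]) else (st.1.insert p.2 aliases, st.2)
        else st) (d, u)
      = (((l.filter (fun p => p.1 == p.2)).map (·.1)).foldl
          (fun g e =>
            let al := (mapping.filter (fun q => q.2 == e && q.1 != e)).map (·.1)
            if al.isEmpty then g else g.insert e al) d,
         u ++ ((l.filter (fun p => p.1 == p.2)).map (·.1)).filter
           (fun e => ((mapping.filter (fun q => q.2 == e && q.1 != e)).map (·.1)).isEmpty)) := by
  induction l generalizing d u with
  | nil => simp
  | cons p l ih =>
    obtain ⟨a, c⟩ := p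
    simp only [List.foldl_cons, List.filter_cons]
    by_cases h1 : a = c
    · subst h1
      simp only [BEq.rfl, if_true]
      by_cases h2 : ((mapping.filter (fun q => q.2 == a && q.1 != a)).map (·.1)).isEmpty
      · simp only [h2, if_true, ih, List.map_cons, List.foldl_cons, List.filter_cons]
        simp
      · simp only [h2, if_false, Bool.false_eq_true, ih, List.map_cons, List.foldl_cons,
          List.filter_cons]
    · have hb : (a == c) = false := by simp [h1]
      simp only [hb, if_false, Bool.false_eq_true, ih]

-- ===== VERDICT (by name: the statement is the Claim_ definition above) =====
theorem mapping_to_groups_spec : Claim_equal_mapping_to_groups := by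
  intro mapping _
  show mapping_to_groups mapping = mapping_to_groups_alt mapping
  unfold mapping_to_groups mapping_to_groups_alt
  simp only
  rw [aFold_closed]
  have hstep :
      (fun (g : PySem.Dict String (List String)) (e : String) =>
        let al := (mapping.filter (fun q => q.2 == e && q.1 != e)).map (·.1)
        if al.isEmpty then g else g.insert e al)
      = (fun g e =>
        if (mapping.foldl (fun (d : PySem.Dict String (List String)) p =>
              if p.1 != p.2 then d.modify p.2 [] (· ++ [p.1]) else d) PySem.Dict.empty).contains e then
          g.insert e ((mapping.foldl (fun (d : PySem.Dict String (List String)) p =>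
              if p.1 != p.2 then d.modify p.2 [] (· ++ [p.1]) else d) PySem.Dict.empty).getD e [])
        else g) := by
    funext g e
    rw [idx_contains mapping PySem.Dict.empty e, idx_getD mapping PySem.Dict.empty e, pred_eq e]
    simp only [PySem.Dict.contains_empty, PySem.Dict.getD_empty, Bool.false_or, List.nil_append]
    by_cases h : (mapping.filter (fun q => q.2 == e && q.1 != e)).isEmpty
    · simp [h]
    · simp [h]
  have hpred :
      (fun (e : String) => ((mapping.filter (fun q => q.2 == e && q.1 != e)).map (·.1)).isEmpty)
      = (fun e => !((mapping.foldl (fun (d : PySem.Dict String (List String)) p =>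
            if p.1 != p.2 then d.modify p.2 [] (· ++ [p.1]) else d) PySem.Dict.empty).contains e)) := by
    funext e
    rw [idx_contains mapping PySem.Dict.empty e, pred_eq e]
    simp
  rw [hstep, hpred, List.nil_append]
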